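-- pv_equiv track=rewrite | github.com/ajax88/chessai | chess/sample/chessboard/chess_board.py | generate_inbetween_squares
-- ===== SOURCE A (Python) =====
-- def generate_inbetween_squares(start_row, start_col, end_row, end_col):
--         # Ensure that boundary squares are unique
--         if start_row == end_row and start_col == end_col:
--             raise ValueError("generator must take unique positions.")
--
--         # Case 1: Diagonal move
--         r_dir, c_dir = 0, 0
--         if abs(end_row - start_row) == abs(end_col - start_col):
--             abs_distance = abs(end_row - start_row)
--             # Determine if column and row values should increase or decrease to get
--             # diagonal direction
--             r_dir = -1 if (start_row - end_row) > 0 else 1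
--             c_dir = -1 if (start_col - end_col) > 0 else 1
--
--         # Case 2: Horizontal move
--         elif start_row == end_row:
--             abs_distance = abs(start_col - end_col)
--             c_dir = -1 if (start_col - end_col) > 0 else 1
--
--         # Case 3: Vertical move
--         elif start_col == end_col:
--             abs_distance = abs(start_row - end_row)
--             r_dir = -1 if (start_row - end_row) > 0 else 1
--
--         else:
--             raise ValueError("Inbetween generator must take straight path.")
--
--         next_row, next_col = start_row, start_col
--         yield (next_row, next_col)
--         for _ in range(abs_distance):
--             next_row += r_dir
--             next_col += c_dir
--             yield (next_row, next_col)
-- ===== SOURCE B (Python) =====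
-- def generate_inbetween_squares(start_row, start_col, end_row, end_col):
--     # Backward walk: march from the end square toward the start (each step moves
--     # one unit toward the start on each axis), collect the path, then reverse it.
--     # No direction/step-count precomputation; termination = arriving at start.
--     if start_row == end_row and start_col == end_col:
--         raise ValueError("generator must take unique positions.")
--     dr = end_row - start_row
--     dc = end_col - start_col
--     if not (abs(dr) == abs(dc) or dr == 0 or dc == 0):
--         raise ValueError("Inbetween generator must take straight path.")
--     path = []
--     r, c = end_row, end_col
--     while (r, c) != (start_row, start_col):
--         path.append((r, c))
--         r -= (r > start_row) - (r < start_row)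
--         c -= (c > start_col) - (c < start_col)
--     path.append((start_row, start_col))
--     yield from reversed(path)
-- ===== Notes on version B (the rewrite author's own statement) =====
-- stated objective: alternative
-- what changed: Instead of A's precomputed direction/step-count and forward incremental accumulation, B walks backwards from the end square toward the start (each step the per-axis sign toward start), terminating on arrival, then reverses the collected path.
import Mathlib
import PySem

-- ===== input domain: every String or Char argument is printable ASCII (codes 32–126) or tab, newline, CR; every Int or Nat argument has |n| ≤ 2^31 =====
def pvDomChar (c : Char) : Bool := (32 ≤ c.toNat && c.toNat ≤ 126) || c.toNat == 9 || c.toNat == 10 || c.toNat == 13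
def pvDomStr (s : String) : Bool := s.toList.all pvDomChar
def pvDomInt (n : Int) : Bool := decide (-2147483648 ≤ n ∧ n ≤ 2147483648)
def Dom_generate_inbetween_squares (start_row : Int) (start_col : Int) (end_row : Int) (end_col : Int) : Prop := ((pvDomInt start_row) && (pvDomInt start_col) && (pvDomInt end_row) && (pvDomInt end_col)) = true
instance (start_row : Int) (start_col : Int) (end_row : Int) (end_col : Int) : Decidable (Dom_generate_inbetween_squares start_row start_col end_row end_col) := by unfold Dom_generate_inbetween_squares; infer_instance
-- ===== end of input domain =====

-- B walks backwards from the end square toward the start (per-axis sign step,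
-- terminating on arrival) and reverses the collected path, instead of A's
-- precomputed direction/step-count forward accumulation; objective: alternative.


-- ===== PORT A =====
-- the trailing yield loop of A: out starts as [(start_row,start_col)], each step adds (r_dir,c_dir)
def pvLoopA (r_dir c_dir : Int) (n : Nat) (st : List (Int × Int) × Int × Int) : List (Int × Int) × Int × Int :=
  (List.range n).foldl
    (fun st _ =>
      let r := st.2.1 + r_dir
      let c := st.2.2 + c_dir
      (st.1 ++ [(r, c)], r, c)) st

def generate_inbetween_squares (start_row : Int) (start_col : Int) (end_row : Int) (end_col : Int) : List (Int × Int) :=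
  if start_row = end_row ∧ start_col = end_col then [] -- ValueError("generator must take unique positions.")
  else
    -- (r_dir, c_dir, abs_distance); the fourth component is false on the final else (ValueError)
    let branch : Int × Int × Nat × Bool :=
      if (end_row - start_row).natAbs = (end_col - start_col).natAbs then
        ((if start_row - end_row > 0 then -1 else 1),
         (if start_col - end_col > 0 then -1 else 1),
         (end_row - start_row).natAbs, true)
      else if start_row = end_row then
        (0, (if start_col - end_col > 0 then -1 else 1), (start_col - end_col).natAbs, true)
      else if start_col = end_col then
        ((if start_row - end_row > 0 then -1 else 1), 0, (start_row - end_row).natAbs, true)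
      else (0, 0, 0, false) -- ValueError("Inbetween generator must take straight path.")
    if branch.2.2.2 then
      (pvLoopA branch.1 branch.2.1 branch.2.2.1
        ([(start_row, start_col)], start_row, start_col)).1
    else []

-- ===== PORT B =====
-- (r > s) - (r < s) of the Python loop body
def pvStep (x s : Int) : Int := (if x > s then 1 else 0) - (if x < s then 1 else 0)

-- the while loop of B: appends (r,c) and steps one unit toward start on each axis.
-- Structural fuel recursion (fuel only makes the loop total: each iteration lowers
-- |r-srow|+|c-scol| by at least 1, so fuel = that measure never runs out).
def pvWalkB (srow scol : Int) : Nat → Int → Int → List (Int × Int) → List (Int × Int)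
  | 0, _, _, path => path
  | fuel + 1, r, c, path =>
    if r = srow ∧ c = scol then path
    else pvWalkB srow scol fuel (r - pvStep r srow) (c - pvStep c scol) (path ++ [(r, c)])

def generate_inbetween_squares_alt (start_row : Int) (start_col : Int) (end_row : Int) (end_col : Int) : List (Int × Int) :=
  if start_row = end_row ∧ start_col = end_col then [] -- ValueError("generator must take unique positions.")
  else
    let dr := end_row - start_row
    let dc := end_col - start_col
    if ¬ (dr.natAbs = dc.natAbs ∨ dr = 0 ∨ dc = 0) then [] -- ValueError("Inbetween generator must take straight path.")
    else ((pvWalkB start_row start_col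
            ((end_row - start_row).natAbs + (end_col - start_col).natAbs)
            end_row end_col []) ++ [(start_row, start_col)]).reverse

-- ===== PRECONDITION & SPEC =====
-- Pre_ excludes exactly the inputs on which A raises ValueError: identical positions,
-- and positions not on a common row, column or diagonal.
def Pre_generate_inbetween_squares (start_row : Int) (start_col : Int) (end_row : Int) (end_col : Int) : Prop :=
  ¬ (start_row = end_row ∧ start_col = end_col) ∧
  ((end_row - start_row).natAbs = (end_col - start_col).natAbs ∨ start_row = end_row ∨ start_col = end_col)
instance (start_row : Int) (start_col : Int) (end_row : Int) (end_col : Int) : Decidable (Pre_generate_inbetween_squares start_row start_col end_row end_col) := by unfold Pre_generate_inbetween_squares; infer_instance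

def pvWitness_generate_inbetween_squares : Int × Int × Int × Int := (1, 1, 4, 4)

def Spec_generate_inbetween_squares (start_row : Int) (start_col : Int) (end_row : Int) (end_col : Int) (out : List (Int × Int)) : Prop := out = generate_inbetween_squares_alt start_row start_col end_row end_col
instance (start_row : Int) (start_col : Int) (end_row : Int) (end_col : Int) (out : List (Int × Int)) : Decidable (Spec_generate_inbetween_squares start_row start_col end_row end_col out) := by unfold Spec_generate_inbetween_squares; infer_instance

-- ===== CLAIM (what is proved, stated in full; the proofs are below) =====
def Claim_equal_generate_inbetween_squares : Prop := ∀ (start_row : Int) (start_col : Int) (end_row : Int) (end_col : Int), Dom_generate_inbetween_squares start_row start_col end_row end_col → Pre_generate_inbetween_squares start_row start_col end_row end_col → Spec_generate_inbetween_squares start_row start_col end_row end_col (generate_inbetween_squares start_row start_col end_row end_col)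

-- ===== LEMMAS AND PROOFS =====

-- the common closed form both ports are reduced to
def pvClosed (sr sc er ec : Int) : List (Int × Int) :=
  (List.range (max (er - sr).natAbs (ec - sc).natAbs + 1)).map
    (fun (i : Nat) => (sr + (i : Int) * pvStep er sr, sc + (i : Int) * pvStep ec sc))

-- A's accumulator loop computes a closed-form map
theorem pvLoopA_closed (r c dr dc : Int) (n : Nat) :
    pvLoopA dr dc n ([(r, c)], r, c) =
      ((List.range (n + 1)).map (fun (i : Nat) => (r + (i : Int) * dr, c + (i : Int) * dc)),
       r + (n : Int) * dr, c + (n : Int) * dc) := by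
  induction n with
  | zero => simp [pvLoopA]
  | succ k ih =>
    unfold pvLoopA at ih ⊢
    rw [List.range_succ, List.foldl_append, ih]
    simp [List.range_succ]
    constructor <;> ring

theorem pvStep_mul (s a : Int) (k : Nat) (hk : 0 < k) (ha : a.natAbs ≤ 1) :
    pvStep (s + (k : Int) * a) s = a := by
  have h3 : a = -1 ∨ a = 0 ∨ a = 1 := by omega
  have hk' : (1 : Int) ≤ (k : Int) := by exact_mod_cast hk
  rcases h3 with h | h | h <;> subst h <;> simp only [pvStep] <;> split_ifs <;> omega

-- B's backward walk, on a straight segment, yields the reversed closed-form map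
theorem pvWalkB_spec (s t a b : Int) (ha : a.natAbs ≤ 1) (hb : b.natAbs ≤ 1)
    (hab : ¬ (a = 0 ∧ b = 0)) :
    ∀ (n fuel : Nat), n ≤ fuel → ∀ (acc : List (Int × Int)),
      pvWalkB s t fuel (s + (n : Int) * a) (t + (n : Int) * b) acc =
        acc ++ ((List.range n).map
          (fun (i : Nat) => (s + ((i : Int) + 1) * a, t + ((i : Int) + 1) * b))).reverse := by
  intro n
  induction n with
  | zero =>
    intro fuel _ acc
    cases fuel with
    | zero => simp [pvWalkB]
    | succ f => simp [pvWalkB]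
  | succ k ih =>
    intro fuel hfuel acc
    obtain ⟨f, rfl⟩ : ∃ f, fuel = f + 1 := ⟨fuel - 1, by omega⟩
    have hk : (0 : Nat) < k + 1 := Nat.succ_pos k
    have hne : ¬ (s + ((k + 1 : Nat) : Int) * a = s ∧ t + ((k + 1 : Nat) : Int) * b = t) := by
      intro ⟨h1, h2⟩
      apply hab
      have hk' : ((k + 1 : Nat) : Int) ≠ 0 := by positivity
      constructor
      · have : ((k + 1 : Nat) : Int) * a = 0 := by omega
        rcases mul_eq_zero.mp this with h | h
        · exact absurd h hk'
        · exact h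
      · have : ((k + 1 : Nat) : Int) * b = 0 := by omega
        rcases mul_eq_zero.mp this with h | h
        · exact absurd h hk'
        · exact h
    rw [pvWalkB, if_neg hne, pvStep_mul s a (k+1) hk ha, pvStep_mul t b (k+1) hk hb]
    have e1 : s + ((k + 1 : Nat) : Int) * a - a = s + (k : Int) * a := by push_cast; ring
    have e2 : t + ((k + 1 : Nat) : Int) * b - b = t + (k : Int) * b := by push_cast; ring
    rw [e1, e2, ih f (by omega)]
    rw [List.range_succ]
    simp only [List.map_append, List.reverse_append, List.map_cons, List.map_nil,
      List.reverse_cons, List.reverse_nil, List.nil_append, List.singleton_append]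
    push_cast
    ring_nf
    simp [List.append_assoc]

-- A reduces to the closed form on Pre_
theorem A_closed (sr sc er ec : Int)
    (h : Pre_generate_inbetween_squares sr sc er ec) :
    generate_inbetween_squares sr sc er ec = pvClosed sr sc er ec := by
  obtain ⟨hne, hstraight⟩ := h
  unfold generate_inbetween_squares pvClosed
  rw [if_neg hne]
  by_cases hd : (er - sr).natAbs = (ec - sc).natAbs
  · rw [if_pos hd]
    simp only
    rw [pvLoopA_closed]
    have hsteps : max (er - sr).natAbs (ec - sc).natAbs = (er - sr).natAbs := by omega
    rw [hsteps]
    apply List.map_congr_left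
    intro i _
    have hr0 : ¬ (er - sr = 0) := by
      intro h0; exact hne ⟨by omega, by omega⟩
    have hr : (if sr - er > 0 then (-1 : Int) else 1) = pvStep er sr := by
      simp only [pvStep]; split_ifs <;> omega
    have hc : (if sc - ec > 0 then (-1 : Int) else 1) = pvStep ec sc := by
      have : ¬ (ec - sc = 0) := by omega
      simp only [pvStep]; split_ifs <;> omega
    rw [hr, hc]
  · rw [if_neg hd]
    by_cases hh : sr = er
    · rw [if_pos hh]
      simp only
      rw [pvLoopA_closed]
      have hc0 : ¬ (ec - sc = 0) := by
        intro h0; exact hne ⟨hh, by omega⟩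
      have hsteps : max (er - sr).natAbs (ec - sc).natAbs = (sc - ec).natAbs := by omega
      rw [hsteps]
      apply List.map_congr_left
      intro i _
      have hr : (0 : Int) = pvStep er sr := by
        simp only [pvStep]; split_ifs <;> omega
      have hc : (if sc - ec > 0 then (-1 : Int) else 1) = pvStep ec sc := by
        simp only [pvStep]; split_ifs <;> omega
      rw [← hr, hc]
    · have hv : sc = ec := by
        rcases hstraight with h | h | h
        · exact absurd h hd
        · exact absurd h hh
        · exact h
      rw [if_neg hh, if_pos hv]
      simp only
      rw [pvLoopA_closed]
      have hr0 : ¬ (er - sr = 0) := by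
        intro h0; exact hne ⟨by omega, hv⟩
      have hsteps : max (er - sr).natAbs (ec - sc).natAbs = (sr - er).natAbs := by omega
      rw [hsteps]
      apply List.map_congr_left
      intro i _
      have hr : (if sr - er > 0 then (-1 : Int) else 1) = pvStep er sr := by
        simp only [pvStep]; split_ifs <;> omega
      have hc : (0 : Int) = pvStep ec sc := by
        simp only [pvStep]; split_ifs <;> omega
      rw [hr, ← hc]

-- B reduces to the same closed form on Pre_
theorem B_closed (sr sc er ec : Int)
    (h : Pre_generate_inbetween_squares sr sc er ec) :
    generate_inbetween_squares_alt sr sc er ec = pvClosed sr sc er ec := by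
  obtain ⟨hne, hstraight⟩ := h
  unfold generate_inbetween_squares_alt
  rw [if_neg hne]
  have hstraight' : (er - sr).natAbs = (ec - sc).natAbs ∨ er - sr = 0 ∨ ec - sc = 0 := by
    rcases hstraight with h | h | h
    · exact Or.inl h
    · exact Or.inr (Or.inl (by omega))
    · exact Or.inr (Or.inr (by omega))
  simp only
  rw [if_neg (not_not_intro hstraight')]
  set a := pvStep er sr with hadef
  set b := pvStep ec sc with hbdef
  set n := max (er - sr).natAbs (ec - sc).natAbs with hndef
  have ha1 : a.natAbs ≤ 1 := by
    rw [hadef]; simp only [pvStep]; split_ifs <;> simp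
  have hb1 : b.natAbs ≤ 1 := by
    rw [hbdef]; simp only [pvStep]; split_ifs <;> simp
  have her : er = sr + (n : Int) * a := by
    rw [hadef, hndef]; simp only [pvStep]; split_ifs <;> omega
  have hec : ec = sc + (n : Int) * b := by
    rw [hbdef, hndef]; simp only [pvStep]; split_ifs <;> omega
  have hab : ¬ (a = 0 ∧ b = 0) := by
    rintro ⟨h1, h2⟩
    rw [h1, mul_zero, add_zero] at her
    rw [h2, mul_zero, add_zero] at hec
    exact hne ⟨her.symm, hec.symm⟩
  have hwalk := pvWalkB_spec sr sc a b ha1 hb1 hab n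
    ((er - sr).natAbs + (ec - sc).natAbs) (by omega) []
  rw [her, hec] at hwalk ⊢
  rw [hwalk]
  simp only [List.nil_append, List.reverse_append, List.reverse_reverse,
    List.reverse_cons, List.reverse_nil, List.singleton_append]
  unfold pvClosed
  rw [← her, ← hec, ← hadef, ← hbdef]
  rw [List.range_succ_eq_map]
  simp only [List.map_cons, List.map_map, Nat.cast_zero, zero_mul, add_zero,
    List.cons.injEq]
  refine ⟨trivial, ?_⟩
  apply List.map_congr_left
  intro i _
  simp only [Function.comp_apply, Prod.mk.injEq]
  constructor <;> push_cast <;> ring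

-- ===== VERDICT (by name: the statement is the Claim_ definition above) =====
theorem generate_inbetween_squares_spec : Claim_equal_generate_inbetween_squares := by
  intro sr sc er ec _ hpre
  unfold Spec_generate_inbetween_squares
  rw [A_closed sr sc er ec hpre, B_closed sr sc er ec hpre]
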